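-- pv_equiv track=rewrite | github.com/wilczynski-jakub/barcode-alarm-productivity | check-if-coding.py | check_programming
-- ===== SOURCE A (Python) =====
-- def check_programming(input_stream):
--
--     programming_chars = {'{', '}', '(', ')', '=', '.', '<', '>', ';', 'space', 'shift', 'tab', 'ctrl', 'tab', 'enter'}
--     count = {char: 0 for char in programming_chars}
--     unique_char_count = 0
--     MINIMUM_CHARACTERS = 100
--
--     for char in input_stream:
--         if char in programming_chars:
--             if count[char] == 0:
--                 unique_char_count += 1
--             count[char] += 1
--
--     total_count = sum(count.values())
--
--     if total_count > MINIMUM_CHARACTERS and unique_char_count > len(programming_chars) / 2: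
--         return True
--     else:
--         return False
-- ===== SOURCE B (Python) =====
-- def check_programming(input_stream):
--     tokens = ('{', '}', '(', ')', '=', '.', '<', '>', ';', 'space', 'shift', 'tab', 'ctrl', 'enter')
--     counts = [input_stream.count(t) for t in tokens]
--     total = sum(counts)
--     unique = sum(1 for c in counts if c > 0)
--     return total > 100 and unique > len(tokens) / 2
-- ===== Notes on version B (the rewrite author's own statement) =====
-- stated objective: alternative
-- what changed: B inverts the traversal: instead of one pass over the stream maintaining a per-character count dict with inline first-occurrence tracking, it iterates over the fixed 14-token table and scans the stream once per token with list.count, deriving total and unique from that count vector.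
import Mathlib
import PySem

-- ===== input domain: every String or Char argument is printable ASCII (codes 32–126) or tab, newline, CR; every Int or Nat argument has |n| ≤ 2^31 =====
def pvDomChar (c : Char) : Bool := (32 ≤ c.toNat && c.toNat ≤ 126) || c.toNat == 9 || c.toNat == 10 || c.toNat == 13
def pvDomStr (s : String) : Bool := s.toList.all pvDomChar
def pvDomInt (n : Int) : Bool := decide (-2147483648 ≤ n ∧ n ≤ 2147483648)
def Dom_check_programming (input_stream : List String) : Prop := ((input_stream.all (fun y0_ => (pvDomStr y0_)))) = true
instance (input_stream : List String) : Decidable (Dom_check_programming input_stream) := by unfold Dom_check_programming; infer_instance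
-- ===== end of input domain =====

-- B inverts the traversal: instead of one stream pass with a count dict and inline unique tracking,
-- it scans the stream once per fixed token with list.count and aggregates that count vector (objective: alternative).

-- ===== PORT A =====
-- literal port of A: a count dict zero-initialised over the set, a fold carrying (count, unique_char_count),
-- then sum(count.values()); 'unique > len(chars)/2' with both sides integers is ported exactly as 2*unique > len.
def check_programming (input_stream : List String) : Bool :=
  let programming_chars : PySem.Set String :=
    PySem.Set.ofList ["{", "}", "(", ")", "=", ".", "<", ">", ";", "space", "shift", "tab", "ctrl", "tab", "enter"]
  let count : PySem.Dict String Int :=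
    programming_chars.foldl (fun d c => d.insert c 0) PySem.Dict.empty
  let st :=
    input_stream.foldl
      (fun (st : PySem.Dict String Int × Int) char =>
        if PySem.Set.contains programming_chars char then
          let st := if st.1.getD char 0 == 0 then (st.1, st.2 + 1) else st
          (st.1.insert char (st.1.getD char 0 + 1), st.2)
        else st)
      (count, 0)
  let total_count := st.1.values.sum
  decide (total_count > 100 ∧ 2 * st.2 > (programming_chars.length : Int))

-- ===== PORT B =====
-- port of Source B: counts = [input_stream.count(t) for t in tokens]; total = sum(counts);
-- unique = sum(1 for c in counts if c > 0); 'unique > len(tokens)/2' integer-exact as 2*unique > len.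
def check_programming_alt (input_stream : List String) : Bool :=
  let tokens : List String := ["{", "}", "(", ")", "=", ".", "<", ">", ";", "space", "shift", "tab", "ctrl", "enter"]
  let counts : List Int := tokens.map (fun t => (PySem.List.count input_stream t : Int))
  let total := counts.sum
  let unique : Int := (counts.map (fun c => if c > 0 then (1 : Int) else 0)).sum
  decide (total > 100 ∧ 2 * unique > (tokens.length : Int))

-- ===== PRECONDITION & SPEC =====
def Spec_check_programming (input_stream : List String) (out : Bool) : Prop := out = check_programming_alt input_stream
instance (input_stream : List String) (out : Bool) : Decidable (Spec_check_programming input_stream out) := by unfold Spec_check_programming; infer_instance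

-- ===== CLAIM (what is proved, stated in full; the proofs are below) =====
def Claim_equal_check_programming : Prop := ∀ (input_stream : List String), Dom_check_programming input_stream → Spec_check_programming input_stream (check_programming input_stream)

-- ===== LEMMAS AND PROOFS =====

-- proof-side names for the pieces of the two ports
def pcs : PySem.Set String :=
  PySem.Set.ofList ["{", "}", "(", ")", "=", ".", "<", ">", ";", "space", "shift", "tab", "ctrl", "tab", "enter"]

def pinit : PySem.Dict String Int := pcs.foldl (fun d c => d.insert c 0) PySem.Dict.empty

def pstep (st : PySem.Dict String Int × Int) (char : String) : PySem.Dict String Int × Int :=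
  if PySem.Set.contains pcs char then
    let st := if st.1.getD char 0 == 0 then (st.1, st.2 + 1) else st
    (st.1.insert char (st.1.getD char 0 + 1), st.2)
  else st

-- the A-side loop state after processing a prefix, in closed form
def dictOf (pre : List String) : PySem.Dict String Int :=
  (pre.filter (fun c => PySem.Set.contains pcs c)).foldl (fun d x => d.insert x (d.getD x 0 + 1)) pinit

def uOf (pre : List String) : Int :=
  ((PySem.Set.ofList (pre.filter (fun c => PySem.Set.contains pcs c))).length : Int)

theorem getD_zero_fold (l : List String) : ∀ (d : PySem.Dict String Int),
    (∀ y, d.getD y 0 = 0) → ∀ x, (l.foldl (fun d c => d.insert c 0) d).getD x 0 = 0 := by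
  induction l with
  | nil => intro d h x; exact h x
  | cons c t ih =>
    intro d h x
    simp only [List.foldl_cons]
    refine ih _ (fun y => ?_) x
    rw [PySem.Dict.getD_insert]
    split_ifs
    · rfl
    · exact h y

theorem pinit_getD (x : String) : pinit.getD x 0 = 0 :=
  getD_zero_fold pcs PySem.Dict.empty (fun y => by simp) x

theorem dictOf_getD (pre : List String) (x : String) :
    (dictOf pre).getD x 0 = ((pre.filter (fun c => PySem.Set.contains pcs c)).count x : Int) := by
  unfold dictOf
  rw [PySem.Dict.getD_foldl_insert_add_one, pinit_getD]
  simp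

theorem filter_append_mem (pre : List String) (x : String) (hx : PySem.Set.contains pcs x = true) :
    (pre ++ [x]).filter (fun c => PySem.Set.contains pcs c)
      = pre.filter (fun c => PySem.Set.contains pcs c) ++ [x] := by
  rw [List.filter_append]
  simp only [List.filter, hx]

theorem filter_append_not_mem (pre : List String) (x : String) (hx : ¬ PySem.Set.contains pcs x = true) :
    (pre ++ [x]).filter (fun c => PySem.Set.contains pcs c)
      = pre.filter (fun c => PySem.Set.contains pcs c) := by
  have hx' : x ∉ pcs := fun h => hx ((PySem.Set.contains_iff _ _).mpr h)
  rw [List.filter_append]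
  simp [hx']

theorem loop_inv (rest : List String) : ∀ pre : List String,
    rest.foldl pstep (dictOf pre, uOf pre) = (dictOf (pre ++ rest), uOf (pre ++ rest)) := by
  induction rest with
  | nil => intro pre; simp
  | cons x t ih =>
    intro pre
    have hstep : pstep (dictOf pre, uOf pre) x = (dictOf (pre ++ [x]), uOf (pre ++ [x])) := by
      by_cases hx : PySem.Set.contains pcs x = true
      · have hfilter := filter_append_mem pre x hx
        have hd : dictOf (pre ++ [x]) = (dictOf pre).insert x ((dictOf pre).getD x 0 + 1) := by
          unfold dictOf; rw [hfilter, List.foldl_append]; rfl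
        have hcnt := dictOf_getD pre x
        by_cases hmem : x ∈ pre.filter (fun c => PySem.Set.contains pcs c)
        · have hne : (dictOf pre).getD x 0 ≠ 0 := by
            rw [hcnt]
            have := List.count_pos_iff.mpr hmem
            omega
          have hu : uOf (pre ++ [x]) = uOf pre := by
            unfold uOf
            rw [hfilter, PySem.Set.ofList_append_singleton,
              PySem.Set.add_of_mem ((PySem.Set.mem_ofList _ _).mpr hmem)]
          simp only [pstep, hx, if_true]
          rw [hd, hu]
          simp [hne]
        · have heq : (dictOf pre).getD x 0 = 0 := by
            rw [hcnt]
            norm_cast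
            exact List.count_eq_zero.mpr hmem
          have hu : uOf (pre ++ [x]) = uOf pre + 1 := by
            unfold uOf
            rw [hfilter, PySem.Set.ofList_append_singleton,
              PySem.Set.add_of_not_mem (fun hc => hmem ((PySem.Set.mem_ofList _ _).mp hc))]
            simp only [List.length_append, List.length_cons, List.length_nil]
            push_cast
            ring
          simp only [pstep, hx, if_true]
          rw [hd, hu]
          simp [heq]
      · have hfilter := filter_append_not_mem pre x hx
        have hd : dictOf (pre ++ [x]) = dictOf pre := by unfold dictOf; rw [hfilter]
        have hu : uOf (pre ++ [x]) = uOf pre := by unfold uOf; rw [hfilter]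
        simp only [pstep, hx, hd, hu]
        simp
    rw [List.foldl_cons, hstep, ih (pre ++ [x])]
    simp

theorem sum_counts (ks : List String) (hnd : ks.Nodup) (m : List String) (h : ∀ x ∈ m, x ∈ ks) :
    (ks.map (fun k => (m.count k : Int))).sum = m.length := by
  induction m with
  | nil => simp
  | cons x t ih =>
    have hx : x ∈ ks := h x (by simp)
    have ht : ∀ y ∈ t, y ∈ ks := fun y hy => h y (by simp [hy])
    have h1 : (ks.map (fun k => ((x :: t).count k : Int))).sum
        = (ks.map (fun k => (t.count k : Int))).sum + (ks.map (fun k => if (k == x) = true then (1:Int) else 0)).sum := by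
      rw [← List.sum_map_add]
      apply congrArg List.sum
      apply List.map_congr_left
      intro k hk
      by_cases hkx : k = x
      · simp [hkx]
      · simp [hkx, Ne.symm hkx]
    have hone : (ks.map (fun k => if (k == x) = true then (1:Int) else 0)).sum = 1 := by
      rw [PySem.List.sum_map_ite_one_zero]
      have := List.count_eq_one_of_mem hnd hx
      simpa [List.count, List.countP_eq_length_filter] using this
    rw [h1, ih ht, hone]
    simp

theorem pinit_keys : pinit.keys = pcs := by decide

theorem dictOf_keys (pre : List String) : (dictOf pre).keys = pinit.keys := by
  unfold dictOf
  rw [PySem.Dict.keys_foldl_insert, PySem.Set.update_eq_append_filter]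
  have hnil : ((PySem.Set.ofList (pre.filter (fun c => PySem.Set.contains pcs c))).filter
      (fun y => !(PySem.Set.contains pinit.keys y))) = [] := by
    rw [List.filter_eq_nil_iff]
    intro y hy
    have hy' : y ∈ pre.filter (fun c => PySem.Set.contains pcs c) := (PySem.Set.mem_ofList _ _).mp hy
    have hc : PySem.Set.contains pcs y = true := List.of_mem_filter hy'
    have : y ∈ pcs := (PySem.Set.contains_iff _ _).mp hc
    simp [pinit_keys, this]
  rw [hnil, List.append_nil]

theorem values_sum (pre : List String) :
    (dictOf pre).values.sum = ((pre.filter (fun c => PySem.Set.contains pcs c)).length : Int) := by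
  have hnd : (dictOf pre).keys.Nodup := by
    rw [dictOf_keys, pinit_keys]; decide
  rw [PySem.Dict.values_eq_map_keys _ hnd 0, dictOf_keys, pinit_keys]
  have hmap : pcs.map (fun k => (dictOf pre).getD k 0)
      = pcs.map (fun k => ((pre.filter (fun c => PySem.Set.contains pcs c)).count k : Int)) :=
    List.map_congr_left (fun k _ => dictOf_getD pre k)
  rw [hmap]
  apply sum_counts
  · decide
  · intro x hx
    exact (PySem.Set.contains_iff _ _).mp (List.of_mem_filter hx)

-- B's count over the full stream restricted to tokens agrees with the count over the filtered stream
theorem count_eq_count_filter (l : List String) (t : String) (ht : t ∈ pcs) :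
    l.count t = (l.filter (fun c => PySem.Set.contains pcs c)).count t := by
  rw [List.count_filter]
  simp
  exact ht

-- B's total equals A's total: sum of per-token counts of the stream = length of the matched sublist
theorem alt_total (l : List String) :
    (pcs.map (fun t => ((l.count t : Nat) : Int))).sum
      = ((l.filter (fun c => PySem.Set.contains pcs c)).length : Int) := by
  have hmap : pcs.map (fun t => ((l.count t : Nat) : Int))
      = pcs.map (fun t => (((l.filter (fun c => PySem.Set.contains pcs c)).count t : Nat) : Int)) :=
    List.map_congr_left (fun t htm => by rw [count_eq_count_filter l t htm])
  rw [hmap]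
  exact sum_counts pcs (by decide) _ (fun x hx => (PySem.Set.contains_iff _ _).mp (List.of_mem_filter hx))

-- a 0/1 ite-sum over a Prop predicate is a countP
theorem sum_ite_prop (l : List String) (p : String → Prop) [DecidablePred p] :
    (l.map (fun t => if p t then (1:Int) else 0)).sum = (l.countP (fun t => decide (p t)) : Int) := by
  induction l with
  | nil => simp
  | cons x t ih =>
    simp only [List.map_cons, List.sum_cons, List.countP_cons, ih]
    by_cases hx : p x <;> simp [hx] <;> push_cast <;> ring

-- B's unique equals A's unique: number of tokens occurring in the stream = number of distinct matched elements
theorem alt_unique (l : List String) :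
    ((pcs.map (fun t => if ((l.count t : Nat) : Int) > 0 then (1:Int) else 0)).sum
      = ((PySem.Set.ofList (l.filter (fun c => PySem.Set.contains pcs c))).length : Int)) := by
  rw [sum_ite_prop]
  have hcount : pcs.countP (fun t => decide (((l.count t : Nat) : Int) > 0))
      = (pcs.filter (fun t => decide (t ∈ l))).length := by
    rw [List.countP_eq_length_filter]
    congr 1
    apply List.filter_congr
    intro t _
    simp [List.count_pos_iff]
  rw [hcount]
  norm_cast
  have h1 : (pcs.filter (fun t => decide (t ∈ l))).Nodup :=
    List.Nodup.filter _ (by decide)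
  have h2 : (PySem.Set.ofList (l.filter (fun c => PySem.Set.contains pcs c))).Nodup :=
    PySem.Set.nodup_ofList _
  rw [← List.toFinset_card_of_nodup h1, ← List.toFinset_card_of_nodup h2]
  congr 1
  ext x
  simp only [List.mem_toFinset, List.mem_filter, PySem.Set.mem_ofList, decide_eq_true_eq]
  constructor
  · rintro ⟨hxp, hxl⟩
    exact ⟨hxl, (PySem.Set.contains_iff _ _).mpr hxp⟩
  · rintro ⟨hxl, hxc⟩
    exact ⟨(PySem.Set.contains_iff _ _).mp hxc, hxl⟩

theorem pcs_eq_tokens :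
    pcs = ["{", "}", "(", ")", "=", ".", "<", ">", ";", "space", "shift", "tab", "ctrl", "enter"] := by
  decide

-- ===== VERDICT (by name: the statement is the Claim_ definition above) =====
theorem check_programming_spec : Claim_equal_check_programming := by
  intro l _
  show check_programming l = check_programming_alt l
  have hloop : l.foldl pstep (pinit, 0) = (dictOf l, uOf l) := by
    have h := loop_inv l []
    have h0 : (dictOf [], uOf []) = (pinit, (0 : Int)) := by unfold dictOf uOf; simp
    rw [h0] at h
    simpa using h
  have hA : check_programming l
      = decide ((l.foldl pstep (pinit, 0)).1.values.sum > 100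
          ∧ 2 * (l.foldl pstep (pinit, 0)).2 > (pcs.length : Int)) := rfl
  have hB : check_programming_alt l
      = decide ((pcs.map (fun t => ((l.count t : Nat) : Int))).sum > 100
          ∧ 2 * (pcs.map (fun t => if ((l.count t : Nat) : Int) > 0 then (1:Int) else 0)).sum
              > (pcs.length : Int)) := by
    show check_programming_alt l = _
    unfold check_programming_alt
    rw [← pcs_eq_tokens]
    simp only [PySem.List.count_eq, List.map_map]
    rfl
  rw [hA, hB, hloop]
  simp only [values_sum, alt_total, alt_unique]
  rfl
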